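-- pv_equiv track=rewrite | github.com/github81/coderbyte | coderbyte-graphs.py | findAdjacentNodes
-- ===== SOURCE A (Python) =====
-- edges = [
-- 		['A','B'],
-- 		['A','D'],
-- 		['B','C'],
-- 		['C','D'],
-- 		['C','E'],
-- 		['D','E']
-- 		]
--
-- def findAdjacentNodes(node):
-- 	adjacentArray = []
-- 	for e in edges:
-- 		if e[0] == node:
-- 			adjacentArray.append(e[1])
-- 		elif e[1] == node:
-- 			adjacentArray.append(e[0])
-- 	return adjacentArray
-- ===== SOURCE B (Python) =====
-- edges = [
-- 		['A','B'],
-- 		['A','D'],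
-- 		['B','C'],
-- 		['C','D'],
-- 		['C','E'],
-- 		['D','E']
-- 		]
--
-- _adjacency = {}
-- for _e in edges:
--     _adjacency.setdefault(_e[0], []).append(_e[1])
--     _adjacency.setdefault(_e[1], []).append(_e[0])
--
-- def findAdjacentNodes(node):
--     return list(_adjacency.get(node, []))
-- ===== Notes on version B (the rewrite author's own statement) =====
-- stated objective: idiomatic
-- what changed: B precomputes a module-level adjacency dictionary in one pass over the edges and answers each query with a loop-free dict lookup (copied), instead of A's per-call scan over all edges.
import Mathlib
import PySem

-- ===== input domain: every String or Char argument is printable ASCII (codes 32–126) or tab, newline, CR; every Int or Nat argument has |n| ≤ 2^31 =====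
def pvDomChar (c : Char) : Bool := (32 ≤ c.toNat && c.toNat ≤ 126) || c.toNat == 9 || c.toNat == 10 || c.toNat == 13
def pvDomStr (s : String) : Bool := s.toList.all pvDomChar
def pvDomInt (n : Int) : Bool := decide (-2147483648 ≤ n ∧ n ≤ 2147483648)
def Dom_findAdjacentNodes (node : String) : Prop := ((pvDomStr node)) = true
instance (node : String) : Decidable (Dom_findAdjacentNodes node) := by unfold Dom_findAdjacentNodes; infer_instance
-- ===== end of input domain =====

-- B precomputes a module-level adjacency dictionary in one pass over the edges and answers each
-- query with a loop-free dict lookup, instead of A's per-call scan over all edges (idiomatic).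

-- ===== PORT A =====
def pvEdges : List (String × String) :=
  [("A","B"), ("A","D"), ("B","C"), ("C","D"), ("C","E"), ("D","E")]

def findAdjacentNodes (node : String) : List String :=
  pvEdges.foldl (fun acc e =>
    if e.1 == node then acc ++ [e.2]
    else if e.2 == node then acc ++ [e.1]
    else acc) []

-- ===== PORT B =====
-- module-level loop of Source B: setdefault(k, []).append(v) = insert k (getD k [] ++ [v])
def pvAdjacency : PySem.Dict String (List String) :=
  pvEdges.foldl (fun d e =>
    let d := d.insert e.1 ((d.getD e.1 []) ++ [e.2])
    d.insert e.2 ((d.getD e.2 []) ++ [e.1])) PySem.Dict.empty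

def findAdjacentNodes_alt (node : String) : List String :=
  pvAdjacency.getD node []

-- ===== PRECONDITION & SPEC =====
def Spec_findAdjacentNodes (node : String) (out : List String) : Prop := out = findAdjacentNodes_alt node
instance (node : String) (out : List String) : Decidable (Spec_findAdjacentNodes node out) := by unfold Spec_findAdjacentNodes; infer_instance

-- ===== CLAIM (what is proved, stated in full; the proofs are below) =====
def Claim_equal_findAdjacentNodes : Prop := ∀ (node : String), Dom_findAdjacentNodes node → Spec_findAdjacentNodes node (findAdjacentNodes node)

-- ===== LEMMAS AND PROOFS =====

theorem findAdjacentNodes_agree (node : String) :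
    findAdjacentNodes node = findAdjacentNodes_alt node := by
  by_cases hA : node = "A"
  · subst hA; rfl
  by_cases hB : node = "B"
  · subst hB; rfl
  by_cases hC : node = "C"
  · subst hC; rfl
  by_cases hD : node = "D"
  · subst hD; rfl
  by_cases hE : node = "E"
  · subst hE; rfl
  -- node matches none of the five vertices: both sides are []
  simp [findAdjacentNodes, findAdjacentNodes_alt, pvEdges, pvAdjacency,
    PySem.Dict.getD, PySem.Dict.get?, PySem.Dict.insert, PySem.Dict.empty,
    Ne.symm hA, Ne.symm hB, Ne.symm hC, Ne.symm hD, Ne.symm hE]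

-- ===== VERDICT (by name: the statement is the Claim_ definition above) =====
theorem findAdjacentNodes_spec : Claim_equal_findAdjacentNodes := by
  intro node _
  exact findAdjacentNodes_agree node
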